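-- pv_equiv track=rewrite | github.com/jgarthur/proteus | python/src/proteus/analysis.py | _collapsed_token_count
-- ===== SOURCE A (Python) =====
-- from typing import Any, Iterable, Sequence
--
-- def _collapsed_token_count(tokens: Sequence[str]) -> int:
--     if not tokens:
--         return 0
--     collapsed = 1
--     previous = tokens[0]
--     for token in tokens[1:]:
--         if token != previous:
--             collapsed += 1
--             previous = token
--     return collapsed
-- ===== SOURCE B (Python) =====
-- from typing import Any, Iterable, Sequence
--
-- def _collapsed_token_count(tokens: Sequence[str]) -> int:
--     n = len(tokens)
--     if n == 0:
--         return 0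
--     if n == 1:
--         return 1
--     mid = n // 2
--     left = tokens[:mid]
--     right = tokens[mid:]
--     return (_collapsed_token_count(left) + _collapsed_token_count(right)
--             - (1 if left[-1] == right[0] else 0))
-- ===== Notes on version B (the rewrite author's own statement) =====
-- stated objective: alternative
-- what changed: Replaced the sequential previous-token scan with a divide-and-conquer recursion: split the list in half, count runs in each half recursively, and subtract one when the halves' boundary tokens are equal.
import Mathlib
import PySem

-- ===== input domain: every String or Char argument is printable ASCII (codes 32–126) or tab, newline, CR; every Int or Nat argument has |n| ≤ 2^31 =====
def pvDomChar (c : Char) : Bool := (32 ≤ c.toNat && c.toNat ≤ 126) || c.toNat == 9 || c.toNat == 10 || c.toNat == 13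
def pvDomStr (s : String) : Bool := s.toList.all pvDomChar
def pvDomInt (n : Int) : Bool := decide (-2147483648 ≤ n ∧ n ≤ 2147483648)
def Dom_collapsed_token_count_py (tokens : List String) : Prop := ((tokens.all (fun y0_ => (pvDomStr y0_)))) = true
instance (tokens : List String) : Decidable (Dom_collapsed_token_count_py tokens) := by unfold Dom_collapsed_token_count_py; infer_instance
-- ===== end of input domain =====

-- B counts runs by divide-and-conquer (split in half, combine with a boundary check) instead of A's sequential previous-token scan; alternative algorithm, similar cost.


-- ===== PORT A =====
-- if not tokens: return 0; collapsed = 1; previous = tokens[0]; loop over tokens[1:]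
def collapsed_token_count_py (tokens : List String) : Int :=
  match tokens with
  | [] => 0
  | t0 :: rest =>
    (rest.foldl
      (fun (st : Int × String) token =>
        if token ≠ st.2 then (st.1 + 1, token) else st)
      (1, t0)).1

-- ===== PORT B =====
-- n = len(tokens); base cases 0/1; mid = n // 2; slices tokens[:mid]/tokens[mid:] are
-- List.take/List.drop (exact here since 0 ≤ mid ≤ n); left[-1]/right[0] via getLast?/head?
-- (both halves are nonempty when n ≥ 2, so the option comparison is exact).
def collapsed_token_count_py_alt (tokens : List String) : Int :=
  if tokens.length = 0 then 0
  else if tokens.length = 1 then 1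
  else
    let mid := tokens.length / 2
    let left := tokens.take mid
    let right := tokens.drop mid
    collapsed_token_count_py_alt left + collapsed_token_count_py_alt right -
      (if left.getLast? = right.head? then 1 else 0)
termination_by tokens.length
decreasing_by
  · simp only [List.length_take]; omega
  · simp only [List.length_drop]; omega

-- ===== PRECONDITION & SPEC =====
def Spec_collapsed_token_count_py (tokens : List String) (out : Int) : Prop := out = collapsed_token_count_py_alt tokens
instance (tokens : List String) (out : Int) : Decidable (Spec_collapsed_token_count_py tokens out) := by unfold Spec_collapsed_token_count_py; infer_instance

-- ===== CLAIM (what is proved, stated in full; the proofs are below) =====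
def Claim_equal_collapsed_token_count_py : Prop := ∀ (tokens : List String), Dom_collapsed_token_count_py tokens → Spec_collapsed_token_count_py tokens (collapsed_token_count_py tokens)

-- ===== LEMMAS AND PROOFS =====
-- pvRuns c xs = number of maximal runs in c :: xs (reference count, used on both sides)
def pvRuns (cur : String) : List String → Int
  | [] => 1
  | y :: ys => if y = cur then pvRuns cur ys else 1 + pvRuns y ys

-- top-level reference count
def pvRunsTop : List String → Int
  | [] => 0
  | x :: xs => pvRuns x xs

theorem pvFold_eq_runs (rest : List String) : ∀ (c : Int) (prev : String),
    (rest.foldl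
      (fun (st : Int × String) token =>
        if token ≠ st.2 then (st.1 + 1, token) else st)
      (c, prev)).1 = c - 1 + pvRuns prev rest := by
  induction rest with
  | nil => intro c prev; simp [pvRuns]
  | cons y ys ih =>
    intro c prev
    rw [List.foldl_cons]; dsimp only
    by_cases h : y = prev
    · rw [if_neg (not_not_intro h), ih]
      show _ = c - 1 + pvRuns prev (y :: ys)
      rw [pvRuns, if_pos h]
    · rw [if_pos h, ih]
      show _ = c - 1 + pvRuns prev (y :: ys)
      rw [pvRuns, if_neg h]
      ring

theorem pvA_eq_runsTop (tokens : List String) :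
    collapsed_token_count_py tokens = pvRunsTop tokens := by
  cases tokens with
  | nil => rfl
  | cons x xs =>
    show (xs.foldl _ (1, x)).1 = pvRuns x xs
    rw [pvFold_eq_runs]; ring

-- last element of c :: as
def pvLastElem (cur : String) : List String → String
  | [] => cur
  | a :: as => pvLastElem a as

theorem pvGetLast?_eq (c : String) (as : List String) :
    (c :: as).getLast? = some (pvLastElem c as) := by
  induction as generalizing c with
  | nil => rfl
  | cons a as ih => rw [List.getLast?_cons_cons, ih, pvLastElem]

theorem pvRuns_append (as : List String) : ∀ (c b : String) (bs : List String),
    pvRuns c (as ++ b :: bs) =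
      pvRuns c as + pvRuns b bs - (if pvLastElem c as = b then 1 else 0) := by
  induction as with
  | nil =>
    intro c b bs
    simp only [List.nil_append, pvRuns, pvLastElem]
    by_cases h : b = c
    · subst h; simp
    · rw [if_neg h, if_neg (fun hc => h hc.symm)]; ring
  | cons a as ih =>
    intro c b bs
    simp only [List.cons_append, pvRuns, pvLastElem]
    by_cases h : a = c
    · subst h
      rw [ih]; simp
    · rw [if_neg h, if_neg h, ih]
      split_ifs <;> ring

theorem pvRunsTop_append (l r : List String) (hl : l ≠ []) (hr : r ≠ []) :
    pvRunsTop (l ++ r) =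
      pvRunsTop l + pvRunsTop r - (if l.getLast? = r.head? then 1 else 0) := by
  obtain ⟨l0, ls, rfl⟩ := List.exists_cons_of_ne_nil hl
  obtain ⟨r0, rs, rfl⟩ := List.exists_cons_of_ne_nil hr
  simp only [pvRunsTop, List.cons_append, pvGetLast?_eq, List.head?_cons,
    Option.some.injEq]
  exact pvRuns_append ls l0 r0 rs

theorem pvB_eq_runsTop_aux : ∀ (n : Nat) (tokens : List String), tokens.length = n →
    collapsed_token_count_py_alt tokens = pvRunsTop tokens := by
  intro n
  induction n using Nat.strong_induction_on with
  | _ n ih =>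
    intro tokens hn
    rw [collapsed_token_count_py_alt]
    by_cases h0 : tokens.length = 0
    · rw [if_pos h0, List.length_eq_zero_iff.mp h0]; rfl
    · rw [if_neg h0]
      by_cases h1 : tokens.length = 1
      · rw [if_pos h1]
        obtain ⟨x, rfl⟩ := List.length_eq_one_iff.mp h1
        rfl
      · rw [if_neg h1]
        show collapsed_token_count_py_alt (tokens.take (tokens.length / 2)) +
              collapsed_token_count_py_alt (tokens.drop (tokens.length / 2)) -
              (if (tokens.take (tokens.length / 2)).getLast? =
                  (tokens.drop (tokens.length / 2)).head? then 1 else 0) =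
            pvRunsTop tokens
        have hlt : (tokens.take (tokens.length / 2)).length < n := by
          simp only [List.length_take]; omega
        have hrt : (tokens.drop (tokens.length / 2)).length < n := by
          simp only [List.length_drop]; omega
        rw [ih _ hlt _ rfl, ih _ hrt _ rfl]
        have hl : tokens.take (tokens.length / 2) ≠ [] := by
          intro h
          have := congrArg List.length h
          simp only [List.length_take, List.length_nil] at this
          omega
        have hr : tokens.drop (tokens.length / 2) ≠ [] := by
          intro h
          have := congrArg List.length h
          simp only [List.length_drop, List.length_nil] at this
          omega
        conv_rhs => rw [← List.take_append_drop (tokens.length / 2) tokens]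
        rw [pvRunsTop_append _ _ hl hr]

theorem pvB_eq_runsTop (tokens : List String) :
    collapsed_token_count_py_alt tokens = pvRunsTop tokens :=
  pvB_eq_runsTop_aux tokens.length tokens rfl

-- ===== VERDICT (by name: the statement is the Claim_ definition above) =====
theorem collapsed_token_count_py_spec : Claim_equal_collapsed_token_count_py := by
  intro tokens _
  unfold Spec_collapsed_token_count_py
  rw [pvA_eq_runsTop, pvB_eq_runsTop]
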